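-- pv_equiv track=rewrite | github.com/billybell/waxwing | firmware/pico-w/waxwing/identity.py | tpk_to_base64url
-- ===== SOURCE A (Python) =====
-- def tpk_to_base64url(pub_bytes):
--     """
--     Encode 32-byte public key as 43-char base64url string (no padding).
--     Used in CBOR Device Identity payload ("tpk" field).
--     """
--     # Base64url alphabet
--     _ALPHABET = "ABCDEFGHIJKLMNOPQRSTUVWXYZabcdefghijklmnopqrstuvwxyz0123456789-_"
--     result = []
--     padding = 0
--     acc = 0
--     bits = 0
--     for byte in pub_bytes:
--         acc = (acc << 8) | byte
--         bits += 8
--         while bits >= 6: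
--             bits -= 6
--             result.append(_ALPHABET[(acc >> bits) & 0x3F])
--     if bits > 0:
--         result.append(_ALPHABET[(acc << (6 - bits)) & 0x3F])
--     return "".join(result)
-- ===== SOURCE B (Python) =====
-- def tpk_to_base64url(pub_bytes):
--     """
--     Encode 32-byte public key as 43-char base64url string (no padding).
--     Used in CBOR Device Identity payload ("tpk" field).
--     """
--     _ALPHABET = "ABCDEFGHIJKLMNOPQRSTUVWXYZabcdefghijklmnopqrstuvwxyz0123456789-_"
--     out = []
--     n = len(pub_bytes)
--     i = 0
--     while i + 3 <= n:
--         b0, b1, b2 = pub_bytes[i], pub_bytes[i + 1], pub_bytes[i + 2]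
--         out.append(_ALPHABET[b0 >> 2])
--         out.append(_ALPHABET[((b0 & 3) << 4) | (b1 >> 4)])
--         out.append(_ALPHABET[((b1 & 15) << 2) | (b2 >> 6)])
--         out.append(_ALPHABET[b2 & 63])
--         i += 3
--     rem = n - i
--     if rem == 1:
--         b0 = pub_bytes[i]
--         out.append(_ALPHABET[b0 >> 2])
--         out.append(_ALPHABET[(b0 & 3) << 4])
--     elif rem == 2:
--         b0, b1 = pub_bytes[i], pub_bytes[i + 1]
--         out.append(_ALPHABET[b0 >> 2])
--         out.append(_ALPHABET[((b0 & 3) << 4) | (b1 >> 4)])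
--         out.append(_ALPHABET[(b1 & 15) << 2])
--     return "".join(out)
-- ===== Notes on version B (the rewrite author's own statement) =====
-- stated objective: alternative
-- what changed: Replaces A's rolling bit-accumulator (acc/bits state with an inner drain-while) by direct per-triple index formulas: an outer loop over complete 3-byte groups emitting 4 chars each, plus an explicit 1- or 2-byte tail case.
-- outside the precondition, e.g. on tpk_to_base64url([300]): A returns 'LA', B raises IndexError; on tpk_to_base64url([0, -300, 0]): A returns 'AtQA', B returns 'AtQA'
import Mathlib
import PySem

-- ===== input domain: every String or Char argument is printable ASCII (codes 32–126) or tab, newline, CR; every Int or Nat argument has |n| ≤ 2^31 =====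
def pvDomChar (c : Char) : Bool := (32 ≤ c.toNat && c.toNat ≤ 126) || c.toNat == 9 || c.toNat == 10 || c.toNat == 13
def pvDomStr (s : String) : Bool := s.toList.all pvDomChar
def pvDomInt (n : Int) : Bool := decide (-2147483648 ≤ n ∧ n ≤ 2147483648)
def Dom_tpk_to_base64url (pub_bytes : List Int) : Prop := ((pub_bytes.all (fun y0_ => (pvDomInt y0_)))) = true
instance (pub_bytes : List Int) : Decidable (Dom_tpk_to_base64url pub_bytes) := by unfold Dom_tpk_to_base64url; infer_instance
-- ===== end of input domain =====

-- B replaces A's rolling bit-accumulator by direct per-3-byte-group index formulas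
-- (alternative decomposition, same O(n) cost); return-value equivalence proved on [-256,256) entries.

-- ===== PORT A =====
-- _ALPHABET; A indexes it as _ALPHABET[(…) & 0x3F], always in range 0..63
def pvB64 : List Char :=
  "ABCDEFGHIJKLMNOPQRSTUVWXYZabcdefghijklmnopqrstuvwxyz0123456789-_".toList
def pvChr (i : Int) : Char := pvB64.getD i.toNat 'A'

-- inner 'while bits >= 6: bits -= 6; result.append(_ALPHABET[(acc >> bits) & 0x3F])'
-- (bits, a Python int, is kept as Nat: it starts at 0 and the loop guard keeps it nonnegative)
def tpkEmit (acc : Int) (bits : Nat) (res : List Char) : List Char × Nat :=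
  if 6 ≤ bits then
    tpkEmit acc (bits - 6) (res ++ [pvChr (PySem.Int.band (acc >>> (bits - 6)) 63)])
  else (res, bits)

-- one iteration of 'for byte in pub_bytes': acc = (acc << 8) | byte; bits += 8; drain
def tpkStep (st : List Char × Int × Nat) (byte : Int) : List Char × Int × Nat :=
  let acc := PySem.Int.bor (st.2.1 <<< (8:Nat)) byte
  let rb := tpkEmit acc (st.2.2 + 8) st.1
  (rb.1, acc, rb.2)

-- trailing 'if bits > 0: result.append(_ALPHABET[(acc << (6 - bits)) & 0x3F])'
def tpkFinish (st : List Char × Int × Nat) : List Char :=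
  if st.2.2 > 0 then st.1 ++ [pvChr (PySem.Int.band (st.2.1 <<< (6 - st.2.2)) 63)] else st.1

def tpk_to_base64url (pub_bytes : List Int) : String :=
  String.mk (tpkFinish (pub_bytes.foldl tpkStep ([], 0, 0)))

-- ===== PORT B =====
-- B indexes _ALPHABET with a raw expression: pyGet? gives Python's negative-index wrap,
-- and its none (Python's IndexError, outside Pre_) is defaulted
def pvChrB (i : Int) : Char := (PySem.List.pyGet? pvB64 i).getD 'A'

-- the four alphabet chars of one complete 3-byte group
def tpkQuad (b0 b1 b2 : Int) : List Char :=
  [pvChrB (b0 >>> (2:Nat)),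
   pvChrB (PySem.Int.bor ((PySem.Int.band b0 3) <<< (4:Nat)) (b1 >>> (4:Nat))),
   pvChrB (PySem.Int.bor ((PySem.Int.band b1 15) <<< (2:Nat)) (b2 >>> (6:Nat))),
   pvChrB (PySem.Int.band b2 63)]

-- the outer 'while i + 3 <= n' loop plus the explicit 1-/2-byte tail cases
def tpkChunks : List Int → List Char
  | b0 :: b1 :: b2 :: rest => tpkQuad b0 b1 b2 ++ tpkChunks rest
  | [b0, b1] =>
      [pvChrB (b0 >>> (2:Nat)),
       pvChrB (PySem.Int.bor ((PySem.Int.band b0 3) <<< (4:Nat)) (b1 >>> (4:Nat))),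
       pvChrB ((PySem.Int.band b1 15) <<< (2:Nat))]
  | [b0] => [pvChrB (b0 >>> (2:Nat)), pvChrB ((PySem.Int.band b0 3) <<< (4:Nat))]
  | [] => []

def tpk_to_base64url_alt (pub_bytes : List Int) : String :=
  String.mk (tpkChunks pub_bytes)

-- ===== PRECONDITION & SPEC =====
-- Pre_ keeps the encoder's natural domain, lists of (possibly signed) byte values in [-256,256):
-- on ints beyond that A still returns a string via Python's unbounded bitwise arithmetic
-- (e.g. A([300]) = 'LA'), but that is outside the purpose 'encode key bytes' and B's direct
-- alphabet indexing usually raises IndexError there.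
def Pre_tpk_to_base64url (pub_bytes : List Int) : Prop :=
  ∀ b ∈ pub_bytes, -256 ≤ b ∧ b < 256
instance (pub_bytes : List Int) : Decidable (Pre_tpk_to_base64url pub_bytes) := by
  unfold Pre_tpk_to_base64url; infer_instance
def pvWitness_tpk_to_base64url : List Int := [1, 2, 3, 255]

def Spec_tpk_to_base64url (pub_bytes : List Int) (out : String) : Prop :=
  out = tpk_to_base64url_alt pub_bytes
instance (pub_bytes : List Int) (out : String) : Decidable (Spec_tpk_to_base64url pub_bytes out) := by
  unfold Spec_tpk_to_base64url; infer_instance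

-- ===== CLAIM (what is proved, stated in full; the proofs are below) =====
def Claim_equal_tpk_to_base64url : Prop :=
  ∀ (pub_bytes : List Int), Dom_tpk_to_base64url pub_bytes →
    Pre_tpk_to_base64url pub_bytes →
    Spec_tpk_to_base64url pub_bytes (tpk_to_base64url pub_bytes)

-- ===== LEMMAS AND PROOFS =====

-- ---- Nat bitwise facts ----
theorem pv_orAddN (k a b : ℕ) (ha : a % 2 ^ k = 0) (hb : b < 2 ^ k) : a ||| b = a + b := by
  obtain ⟨q, rfl⟩ := Nat.dvd_of_mod_eq_zero ha
  apply Nat.eq_of_testBit_eq; intro j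
  have h0 : (2 ^ k * q + 0).testBit j = if j < k then Nat.testBit 0 j else q.testBit (j - k) :=
    Nat.testBit_two_pow_mul_add q (Nat.two_pow_pos k) j
  rw [Nat.add_zero] at h0
  rw [Nat.testBit_lor, Nat.testBit_two_pow_mul_add q hb j, h0]
  rcases Nat.lt_or_ge j k with hj | hj
  · simp [hj]
  · have : b.testBit j = false :=
      Nat.testBit_eq_false_of_lt (lt_of_lt_of_le hb (Nat.pow_le_pow_right (by norm_num) hj))
    simp [Nat.not_lt.mpr hj, this]

theorem pv_andLow (m v k : ℕ) (hm : m % 2 ^ k = 2 ^ k - 1) (hv : v < 2 ^ k) : m &&& v = v := by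
  apply Nat.eq_of_testBit_eq; intro j
  rw [Nat.testBit_and]
  rcases Nat.lt_or_ge j k with hj | hj
  · have h1 : (m % 2 ^ k).testBit j = (decide (j < k) && m.testBit j) := Nat.testBit_mod_two_pow m k j
    rw [hm, Nat.testBit_two_pow_sub_one] at h1
    have : m.testBit j = true := by simpa [hj] using h1.symm
    rw [this, Bool.true_and]
  · have : v.testBit j = false :=
      Nat.testBit_eq_false_of_lt (lt_of_lt_of_le hv (Nat.pow_le_pow_right (by norm_num) hj))
    simp [this]

theorem pv_andZero (u n k : ℕ) (hu : u % 2 ^ k = 0) (hn : n < 2 ^ k) : n &&& u = 0 := by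
  apply Nat.eq_of_testBit_eq; intro j
  rw [Nat.testBit_and, Nat.zero_testBit]
  rcases Nat.lt_or_ge j k with hj | hj
  · have h1 : (u % 2 ^ k).testBit j = (decide (j < k) && u.testBit j) := Nat.testBit_mod_two_pow u k j
    rw [hu, Nat.zero_testBit] at h1
    have : u.testBit j = false := by simpa [hj] using h1.symm
    simp [this]
  · have : n.testBit j = false :=
      Nat.testBit_eq_false_of_lt (lt_of_lt_of_le hn (Nat.pow_le_pow_right (by norm_num) hj))
    simp [this]

-- ---- Int bridges: Python's &, |, <<, >> as arithmetic ----
theorem pv_shl8 (x : Int) : x <<< (8:Nat) = x * 256 := by rw [Int.shiftLeft_eq']; norm_num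
theorem pv_shl4 (x : Int) : x <<< (4:Nat) = x * 16 := by rw [Int.shiftLeft_eq']; norm_num
theorem pv_shl2 (x : Int) : x <<< (2:Nat) = x * 4 := by rw [Int.shiftLeft_eq']; norm_num
theorem pv_shr2 (x : Int) : x >>> (2:Nat) = x / 4 := by rw [Int.shiftRight_eq_div_pow]; norm_num
theorem pv_shr4 (x : Int) : x >>> (4:Nat) = x / 16 := by rw [Int.shiftRight_eq_div_pow]; norm_num
theorem pv_shr6 (x : Int) : x >>> (6:Nat) = x / 64 := by rw [Int.shiftRight_eq_div_pow]; norm_num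

theorem pv_band63 (x : Int) : PySem.Int.band x 63 = x % 64 := by
  rw [PySem.Int.band.eq_1]
  rcases (show 0 ≤ x ∨ x < 0 by omega) with h | h
  · rw [if_pos h, if_pos (by norm_num)]
    have hh : x.toNat &&& (63:Int).toNat = x.toNat % 64 := by
      simpa using Nat.and_two_pow_sub_one_eq_mod x.toNat 6
    rw [hh]; omega
  · rw [if_neg (by omega), if_pos (by norm_num)]
    have hh : (63:Int).toNat &&& (-x-1).toNat = (-x-1).toNat % 64 := by
      rw [Nat.and_comm]; simpa using Nat.and_two_pow_sub_one_eq_mod (-x-1).toNat 6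
    rw [hh]; omega

theorem pv_band3 (x : Int) : PySem.Int.band x 3 = x % 4 := by
  rw [PySem.Int.band.eq_1]
  rcases (show 0 ≤ x ∨ x < 0 by omega) with h | h
  · rw [if_pos h, if_pos (by norm_num)]
    have hh : x.toNat &&& (3:Int).toNat = x.toNat % 4 := by
      simpa using Nat.and_two_pow_sub_one_eq_mod x.toNat 2
    rw [hh]; omega
  · rw [if_neg (by omega), if_pos (by norm_num)]
    have hh : (3:Int).toNat &&& (-x-1).toNat = (-x-1).toNat % 4 := by
      rw [Nat.and_comm]; simpa using Nat.and_two_pow_sub_one_eq_mod (-x-1).toNat 2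
    rw [hh]; omega

theorem pv_band15 (x : Int) : PySem.Int.band x 15 = x % 16 := by
  rw [PySem.Int.band.eq_1]
  rcases (show 0 ≤ x ∨ x < 0 by omega) with h | h
  · rw [if_pos h, if_pos (by norm_num)]
    have hh : x.toNat &&& (15:Int).toNat = x.toNat % 16 := by
      simpa using Nat.and_two_pow_sub_one_eq_mod x.toNat 4
    rw [hh]; omega
  · rw [if_neg (by omega), if_pos (by norm_num)]
    have hh : (15:Int).toNat &&& (-x-1).toNat = (-x-1).toNat % 16 := by
      rw [Nat.and_comm]; simpa using Nat.and_two_pow_sub_one_eq_mod (-x-1).toNat 4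
    rw [hh]; omega

-- '|' where the left operand is a multiple of 2^k and the right operand fits in k bits:
-- plain addition for 0 ≤ v < 2^k, absorption for -2^k ≤ v < 0 (two's complement sign bits)
theorem pv_bor256_pos (u v : Int) (hu : u % 256 = 0) (h0 : 0 ≤ v) (hv : v < 256) :
    PySem.Int.bor u v = u + v := by
  rcases (show 0 ≤ u ∨ u < 0 by omega) with hp | hn
  · rw [PySem.Int.bor_of_nonneg hp h0,
      pv_orAddN 8 u.toNat v.toNat (by simp; omega) (by simp; omega)]
    omega
  · rw [PySem.Int.bor.eq_1, if_neg (by omega), if_pos h0,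
      pv_andLow (-u-1).toNat v.toNat 8 (by simp; omega) (by simp; omega)]
    omega

theorem pv_bor256_neg (u v : Int) (hu : u % 256 = 0) (h0 : -256 ≤ v) (hv : v < 0) :
    PySem.Int.bor u v = v := by
  rcases (show 0 ≤ u ∨ u < 0 by omega) with hp | hn
  · rw [PySem.Int.bor.eq_1, if_pos hp, if_neg (by omega),
      pv_andZero u.toNat (-v-1).toNat 8 (by simp; omega) (by simp; omega)]
    omega
  · rw [PySem.Int.bor.eq_1, if_neg (by omega), if_neg (by omega),
      pv_andLow (-u-1).toNat (-v-1).toNat 8 (by simp; omega) (by simp; omega)]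
    omega

theorem pv_bor16_pos (u v : Int) (hu : u % 16 = 0) (h0 : 0 ≤ v) (hv : v < 16) :
    PySem.Int.bor u v = u + v := by
  rcases (show 0 ≤ u ∨ u < 0 by omega) with hp | hn
  · rw [PySem.Int.bor_of_nonneg hp h0,
      pv_orAddN 4 u.toNat v.toNat (by simp; omega) (by simp; omega)]
    omega
  · rw [PySem.Int.bor.eq_1, if_neg (by omega), if_pos h0,
      pv_andLow (-u-1).toNat v.toNat 4 (by simp; omega) (by simp; omega)]
    omega

theorem pv_bor16_neg (u v : Int) (hu : u % 16 = 0) (h0 : -16 ≤ v) (hv : v < 0) :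
    PySem.Int.bor u v = v := by
  rcases (show 0 ≤ u ∨ u < 0 by omega) with hp | hn
  · rw [PySem.Int.bor.eq_1, if_pos hp, if_neg (by omega),
      pv_andZero u.toNat (-v-1).toNat 4 (by simp; omega) (by simp; omega)]
    omega
  · rw [PySem.Int.bor.eq_1, if_neg (by omega), if_neg (by omega),
      pv_andLow (-u-1).toNat (-v-1).toNat 4 (by simp; omega) (by simp; omega)]
    omega

theorem pv_bor4_pos (u v : Int) (hu : u % 4 = 0) (h0 : 0 ≤ v) (hv : v < 4) :
    PySem.Int.bor u v = u + v := by
  rcases (show 0 ≤ u ∨ u < 0 by omega) with hp | hn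
  · rw [PySem.Int.bor_of_nonneg hp h0,
      pv_orAddN 2 u.toNat v.toNat (by simp; omega) (by simp; omega)]
    omega
  · rw [PySem.Int.bor.eq_1, if_neg (by omega), if_pos h0,
      pv_andLow (-u-1).toNat v.toNat 2 (by simp; omega) (by simp; omega)]
    omega

theorem pv_bor4_neg (u v : Int) (hu : u % 4 = 0) (h0 : -4 ≤ v) (hv : v < 0) :
    PySem.Int.bor u v = v := by
  rcases (show 0 ≤ u ∨ u < 0 by omega) with hp | hn
  · rw [PySem.Int.bor.eq_1, if_pos hp, if_neg (by omega),
      pv_andZero u.toNat (-v-1).toNat 2 (by simp; omega) (by simp; omega)]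
    omega
  · rw [PySem.Int.bor.eq_1, if_neg (by omega), if_neg (by omega),
      pv_andLow (-u-1).toNat (-v-1).toNat 2 (by simp; omega) (by simp; omega)]
    omega

-- B's raw alphabet index (wrap for -64 ≤ i < 0) equals A's masked one
theorem pv_chrB (i : Int) (h1 : -64 ≤ i) (h2 : i < 64) : pvChrB i = pvChr (i % 64) := by
  unfold pvChrB pvChr
  rw [PySem.List.pyGet?]
  have hlen : pvB64.length = 64 := by decide
  rcases (show 0 ≤ i ∨ i < 0 by omega) with h | h
  · rw [PySem.List.pyIdx?, if_pos h, if_pos (by omega)]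
    rw [List.getD_eq_getElem?_getD]
    have : i % 64 = i := by omega
    rw [this]
    rfl
  · rw [PySem.List.pyIdx?, if_neg (by omega), if_pos (by omega)]
    rw [List.getD_eq_getElem?_getD, hlen]
    have : (i % 64).toNat = 64 - (-i).toNat := by omega
    rw [this]
    rfl

-- ---- the four group chars and the two tail chars agree ----
theorem pv_c1 (acc b0 : Int) (hl : -256 ≤ b0) (hr : b0 < 256) :
    pvChr (PySem.Int.band ((PySem.Int.bor (acc <<< (8:Nat)) b0) >>> (2:Nat)) 63)
      = pvChrB (b0 >>> (2:Nat)) := by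
  rw [pv_shr2, pv_band63, pv_shr2, pv_chrB (b0 / 4) (by omega) (by omega), pv_shl8]
  rcases (show 0 ≤ b0 ∨ b0 < 0 by omega) with hb | hb
  · rw [pv_bor256_pos (acc * 256) b0 (by omega) hb hr]
    exact congrArg pvChr (by omega)
  · rw [pv_bor256_neg (acc * 256) b0 (by omega) hl hb]

theorem pv_c2 (acc b0 b1 : Int) (hl0 : -256 ≤ b0) (hr0 : b0 < 256)
    (hl1 : -256 ≤ b1) (hr1 : b1 < 256) :
    pvChr (PySem.Int.band
      ((PySem.Int.bor ((PySem.Int.bor (acc <<< (8:Nat)) b0) <<< (8:Nat)) b1) >>> (4:Nat)) 63)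
      = pvChrB (PySem.Int.bor ((PySem.Int.band b0 3) <<< (4:Nat)) (b1 >>> (4:Nat))) := by
  rw [pv_shr4, pv_band63, pv_band3, pv_shl4, pv_shr4, pv_shl8 acc,
    pv_shl8 (PySem.Int.bor (acc * 256) b0)]
  rcases (show 0 ≤ b1 ∨ b1 < 0 by omega) with hb1 | hb1
  · rw [pv_bor256_pos (PySem.Int.bor (acc * 256) b0 * 256) b1 (by omega) hb1 hr1,
      pv_bor16_pos (b0 % 4 * 16) (b1 / 16) (by omega) (by omega) (by omega),
      pv_chrB (b0 % 4 * 16 + b1 / 16) (by omega) (by omega)]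
    rcases (show 0 ≤ b0 ∨ b0 < 0 by omega) with hb0 | hb0
    · rw [pv_bor256_pos (acc * 256) b0 (by omega) hb0 hr0]
      exact congrArg pvChr (by omega)
    · rw [pv_bor256_neg (acc * 256) b0 (by omega) hl0 hb0]
      exact congrArg pvChr (by omega)
  · rw [pv_bor256_neg (PySem.Int.bor (acc * 256) b0 * 256) b1 (by omega) hl1 hb1,
      pv_bor16_neg (b0 % 4 * 16) (b1 / 16) (by omega) (by omega) (by omega),
      pv_chrB (b1 / 16) (by omega) (by omega)]

theorem pv_c3 (acc b0 b1 b2 : Int) (hl1 : -256 ≤ b1) (hr1 : b1 < 256)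
    (hl2 : -256 ≤ b2) (hr2 : b2 < 256) :
    pvChr (PySem.Int.band
      ((PySem.Int.bor ((PySem.Int.bor ((PySem.Int.bor (acc <<< (8:Nat)) b0) <<< (8:Nat)) b1)
        <<< (8:Nat)) b2) >>> (6:Nat)) 63)
      = pvChrB (PySem.Int.bor ((PySem.Int.band b1 15) <<< (2:Nat)) (b2 >>> (6:Nat))) := by
  rw [pv_shr6, pv_band63, pv_band15, pv_shl2, pv_shr6, pv_shl8 acc,
    pv_shl8 (PySem.Int.bor (acc * 256) b0),
    pv_shl8 (PySem.Int.bor (PySem.Int.bor (acc * 256) b0 * 256) b1)]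
  rcases (show 0 ≤ b2 ∨ b2 < 0 by omega) with hb2 | hb2
  · rw [pv_bor256_pos (PySem.Int.bor (PySem.Int.bor (acc * 256) b0 * 256) b1 * 256) b2
        (by omega) hb2 hr2,
      pv_bor4_pos (b1 % 16 * 4) (b2 / 64) (by omega) (by omega) (by omega),
      pv_chrB (b1 % 16 * 4 + b2 / 64) (by omega) (by omega)]
    rcases (show 0 ≤ b1 ∨ b1 < 0 by omega) with hb1 | hb1
    · rw [pv_bor256_pos (PySem.Int.bor (acc * 256) b0 * 256) b1 (by omega) hb1 hr1]
      exact congrArg pvChr (by omega)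
    · rw [pv_bor256_neg (PySem.Int.bor (acc * 256) b0 * 256) b1 (by omega) hl1 hb1]
      exact congrArg pvChr (by omega)
  · rw [pv_bor256_neg (PySem.Int.bor (PySem.Int.bor (acc * 256) b0 * 256) b1 * 256) b2
        (by omega) hl2 hb2,
      pv_bor4_neg (b1 % 16 * 4) (b2 / 64) (by omega) (by omega) (by omega),
      pv_chrB (b2 / 64) (by omega) (by omega)]

theorem pv_c4 (x b2 : Int) (hl2 : -256 ≤ b2) (hr2 : b2 < 256) :
    pvChr (PySem.Int.band (PySem.Int.bor (x <<< (8:Nat)) b2) 63)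
      = pvChrB (PySem.Int.band b2 63) := by
  rw [pv_band63, pv_band63, pv_shl8, pv_chrB (b2 % 64) (by omega) (by omega)]
  rcases (show 0 ≤ b2 ∨ b2 < 0 by omega) with hb2 | hb2
  · rw [pv_bor256_pos (x * 256) b2 (by omega) hb2 hr2]
    exact congrArg pvChr (by omega)
  · rw [pv_bor256_neg (x * 256) b2 (by omega) hl2 hb2]
    exact congrArg pvChr (by omega)

theorem pv_t1 (acc b0 : Int) (hl0 : -256 ≤ b0) (hr0 : b0 < 256) :
    pvChr (PySem.Int.band ((PySem.Int.bor (acc <<< (8:Nat)) b0) <<< (4:Nat)) 63)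
      = pvChrB ((PySem.Int.band b0 3) <<< (4:Nat)) := by
  rw [pv_shl4, pv_band63, pv_band3, pv_shl4, pv_shl8,
    pv_chrB (b0 % 4 * 16) (by omega) (by omega)]
  rcases (show 0 ≤ b0 ∨ b0 < 0 by omega) with hb0 | hb0
  · rw [pv_bor256_pos (acc * 256) b0 (by omega) hb0 hr0]
    exact congrArg pvChr (by omega)
  · rw [pv_bor256_neg (acc * 256) b0 (by omega) hl0 hb0]
    exact congrArg pvChr (by omega)

theorem pv_t2 (acc b0 b1 : Int) (hl1 : -256 ≤ b1) (hr1 : b1 < 256) :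
    pvChr (PySem.Int.band
      ((PySem.Int.bor ((PySem.Int.bor (acc <<< (8:Nat)) b0) <<< (8:Nat)) b1) <<< (2:Nat)) 63)
      = pvChrB ((PySem.Int.band b1 15) <<< (2:Nat)) := by
  rw [pv_shl2, pv_band63, pv_band15, pv_shl2, pv_shl8 acc,
    pv_shl8 (PySem.Int.bor (acc * 256) b0),
    pv_chrB (b1 % 16 * 4) (by omega) (by omega)]
  rcases (show 0 ≤ b1 ∨ b1 < 0 by omega) with hb1 | hb1
  · rw [pv_bor256_pos (PySem.Int.bor (acc * 256) b0 * 256) b1 (by omega) hb1 hr1]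
    exact congrArg pvChr (by omega)
  · rw [pv_bor256_neg (PySem.Int.bor (acc * 256) b0 * 256) b1 (by omega) hl1 hb1]
    exact congrArg pvChr (by omega)

-- ---- evaluating the drain loop at the concrete bit counts the fold reaches ----
theorem pv_emit_lt (acc : Int) (res : List Char) {bits : Nat} (h : bits < 6) :
    tpkEmit acc bits res = (res, bits) := by
  rw [tpkEmit]; simp [Nat.not_le.mpr h]

theorem pv_emit8 (acc : Int) (res : List Char) :
    tpkEmit acc 8 res = (res ++ [pvChr (PySem.Int.band (acc >>> (2:Nat)) 63)], 2) := by
  rw [tpkEmit]; norm_num [pv_emit_lt]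

theorem pv_emit10 (acc : Int) (res : List Char) :
    tpkEmit acc 10 res = (res ++ [pvChr (PySem.Int.band (acc >>> (4:Nat)) 63)], 4) := by
  rw [tpkEmit]; norm_num [pv_emit_lt]

theorem pv_emit12 (acc : Int) (res : List Char) :
    tpkEmit acc 12 res
      = (res ++ [pvChr (PySem.Int.band (acc >>> (6:Nat)) 63), pvChr (PySem.Int.band acc 63)], 0) := by
  rw [tpkEmit]; norm_num
  rw [tpkEmit]; norm_num [pv_emit_lt, Int.shiftRight_zero]

-- one fold step, with the drain loop exposed
theorem pv_step (res : List Char) (acc : Int) (bits : Nat) (byte : Int) :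
    tpkStep (res, acc, bits) byte
      = ((tpkEmit (PySem.Int.bor (acc <<< (8:Nat)) byte) (bits + 8) res).1,
         PySem.Int.bor (acc <<< (8:Nat)) byte,
         (tpkEmit (PySem.Int.bor (acc <<< (8:Nat)) byte) (bits + 8) res).2) := rfl

-- the main invariant: from 'bits = 0', A's loop + trailing step emits exactly B's chunks
theorem pv_inv : ∀ (l : List Int), (∀ b ∈ l, -256 ≤ b ∧ b < 256) →
    ∀ (res : List Char) (acc : Int),
      tpkFinish (l.foldl tpkStep (res, acc, 0)) = res ++ tpkChunks l := by
  intro l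
  induction l using tpkChunks.induct with
  | case1 b0 b1 b2 rest ih =>
    intro hl res acc
    obtain ⟨h00, h01⟩ := hl b0 (by simp)
    obtain ⟨h10, h11⟩ := hl b1 (by simp)
    obtain ⟨h20, h21⟩ := hl b2 (by simp)
    simp only [List.foldl_cons, pv_step, Nat.zero_add, Nat.reduceAdd, pv_emit8, pv_emit10,
      pv_emit12]
    rw [pv_c1 acc b0 h00 h01, pv_c2 acc b0 b1 h00 h01 h10 h11,
      pv_c3 acc b0 b1 b2 h10 h11 h20 h21, pv_c4 _ b2 h20 h21]
    rw [ih (fun b hb => hl b (by simp [hb])) _ _]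
    simp [tpkChunks, tpkQuad]
  | case2 b0 b1 =>
    intro hl res acc
    obtain ⟨h00, h01⟩ := hl b0 (by simp)
    obtain ⟨h10, h11⟩ := hl b1 (by simp)
    simp only [List.foldl_cons, List.foldl_nil, pv_step, Nat.zero_add, Nat.reduceAdd,
      pv_emit8, pv_emit10]
    rw [pv_c1 acc b0 h00 h01, pv_c2 acc b0 b1 h00 h01 h10 h11]
    unfold tpkFinish
    norm_num [pv_t2 acc b0 b1 h10 h11, tpkChunks]
  | case3 b0 =>
    intro hl res acc
    obtain ⟨h00, h01⟩ := hl b0 (by simp)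
    simp only [List.foldl_cons, List.foldl_nil, pv_step, Nat.zero_add, pv_emit8]
    rw [pv_c1 acc b0 h00 h01]
    unfold tpkFinish
    norm_num [pv_t1 acc b0 h00 h01, tpkChunks]
  | case4 =>
    intro _ res acc
    simp [tpkFinish, tpkChunks]

-- ===== VERDICT (by name: the statement is the Claim_ definition above) =====
theorem tpk_to_base64url_spec : Claim_equal_tpk_to_base64url := by
  intro l _ hpre
  unfold Spec_tpk_to_base64url tpk_to_base64url tpk_to_base64url_alt
  rw [pv_inv l hpre [] 0, List.nil_append]
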